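-- pv_equiv track=rewrite | github.com/embydextrous/Interview | graph/bfsdfs/31-binaryPalindrome.py | bp2
-- ===== SOURCE A (Python) =====
-- def bp2(n, k):
--     if k > n or n % k == 0:
--         return 10 ** (n - 1) + 1
--     s = [0 for i in range(k)]
--     s[0] = 1
--     a = [i % k for i in range(n)]
--     l, r = 0, n - 1
--     while l < r:
--         i, j = a[l], a[r]
--         if s[i] == 1 or s[j] == 1:
--             s[i] = s[j] = 1
--         l += 1
--         r -= 1
--     result = 0
--     for i in s:
--         result = result * 10 + i
--     return result
-- ===== SOURCE B (Python) =====
-- def bp2(n, k):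
--     if k > n or n % k == 0:
--         return 10 ** (n - 1) + 1
--     s = [0] * k
--     s[0] = 1
--     total = n // 2
--     period = [(t % k, (n - 1 - t) % k) for t in range(k)]
--     done = 0
--     while done < total:
--         chunk = min(k, total - done)
--         changed = False
--         for t in range(chunk):
--             i, j = period[t]
--             if s[i] == 1 or s[j] == 1:
--                 if s[i] != 1 or s[j] != 1:
--                     changed = True
--                 s[i] = s[j] = 1
--         done += chunk
--         if chunk < k or not changed:
--             break
--     result = 0
--     for d in s:
--         result = result * 10 + d
--     return result
-- ===== Notes on version B (the rewrite author's own statement) =====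
-- stated objective: alternative
-- what changed: A sweeps all n//2 mirror pairs once; B precomputes the k periodic pairs (the pair at position l depends only on l % k) and replays them in rounds, stopping as soon as a full round changes nothing.
-- outside the precondition, e.g. on bp2(0, 3): A returns 1.1, B returns 1.1; on bp2(5, 0): A raises ZeroDivisionError, B raises ZeroDivisionError; on bp2(5, -2): A raises IndexError, B raises IndexError
import Mathlib
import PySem

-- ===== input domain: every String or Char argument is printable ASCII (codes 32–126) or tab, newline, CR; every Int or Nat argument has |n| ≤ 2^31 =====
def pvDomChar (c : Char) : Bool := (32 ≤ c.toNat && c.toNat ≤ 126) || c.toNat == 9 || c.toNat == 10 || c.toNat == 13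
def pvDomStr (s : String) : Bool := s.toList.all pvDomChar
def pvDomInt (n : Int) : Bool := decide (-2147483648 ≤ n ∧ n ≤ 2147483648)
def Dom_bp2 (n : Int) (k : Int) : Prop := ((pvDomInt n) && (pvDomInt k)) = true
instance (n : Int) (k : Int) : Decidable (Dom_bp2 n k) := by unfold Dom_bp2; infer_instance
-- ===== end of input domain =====

-- B: instead of A's single sweep over all n/2 mirror pairs, precompute the k periodic
-- pairs (the pair at position l depends only on l mod k) and replay them in rounds,
-- stopping once a full round changes nothing (alternative decomposition, same result).

-- ===== PORT A =====
-- while l < r: propagate 1s through mirror pairs (a[l], a[r]), l += 1, r -= 1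
def bp2LoopA (a : List Int) (s : List Int) (l r : Int) : List Int :=
  if _h : l < r then
    let i := PySem.List.pyGetD a l 0
    let j := PySem.List.pyGetD a r 0
    let s' := if PySem.List.pyGetD s i 0 = 1 ∨ PySem.List.pyGetD s j 0 = 1
              then PySem.List.pySetD (PySem.List.pySetD s i 1) j 1
              else s
    bp2LoopA a s' (l + 1) (r - 1)
  else s
termination_by (r - l).toNat
decreasing_by omega

def bp2 (n : Int) (k : Int) : Int :=
  if k > n ∨ PySem.Int.mod n k = 0 then 10 ^ (n - 1).toNat + 1
  else
    let s := PySem.List.pySetD ((PySem.List.pyRange 0 k 1).map (fun _ => (0 : Int))) 0 1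
    let a := (PySem.List.pyRange 0 n 1).map (fun i => PySem.Int.mod i k)
    let s2 := bp2LoopA a s 0 (n - 1)
    s2.foldl (fun result i => result * 10 + i) 0

-- ===== PORT B =====
-- inner for-loop of Source B: fold over the pairs of the current chunk, tracking the changed flag
def bp2StepB (sc : List Int × Bool) (p : Int × Int) : List Int × Bool :=
  let s := sc.1
  if PySem.List.pyGetD s p.1 0 = 1 ∨ PySem.List.pyGetD s p.2 0 = 1 then
    let changed := if ¬ PySem.List.pyGetD s p.1 0 = 1 ∨ ¬ PySem.List.pyGetD s p.2 0 = 1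
                   then true else sc.2
    (PySem.List.pySetD (PySem.List.pySetD s p.1 1) p.2 1, changed)
  else sc

-- while done < total: process one chunk, stop on a stable full period (fuel only makes it total)
def bp2LoopB (period : List (Int × Int)) (k total : Int) (fuel : Nat) (done : Int)
    (s : List Int) : List Int :=
  match fuel with
  | 0 => s
  | fuel + 1 =>
    if done < total then
      let chunk := min k (total - done)
      let r := (period.take chunk.toNat).foldl bp2StepB (s, false)
      if chunk < k ∨ r.2 = false then r.1
      else bp2LoopB period k total fuel (done + chunk) r.1
    else s

def bp2_alt (n : Int) (k : Int) : Int :=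
  if k > n ∨ PySem.Int.mod n k = 0 then 10 ^ (n - 1).toNat + 1
  else
    let s := PySem.List.pySetD (List.replicate k.toNat (0 : Int)) 0 1
    let total := PySem.Int.floordiv n 2
    let period := (PySem.List.pyRange 0 k 1).map
      (fun t => (PySem.Int.mod t k, PySem.Int.mod (n - 1 - t) k))
    let s2 := bp2LoopB period k total (total.toNat + 1) 0 s
    s2.foldl (fun result d => result * 10 + d) 0

-- ===== PRECONDITION & SPEC =====
-- Pre_ excludes n ≤ 0 and k ≤ 0, on which A raises (ZeroDivisionError or IndexError)
-- or returns a float 10**(n-1) instead of an int.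
def Pre_bp2 (n : Int) (k : Int) : Prop := 1 ≤ n ∧ 1 ≤ k
instance (n : Int) (k : Int) : Decidable (Pre_bp2 n k) := by unfold Pre_bp2; infer_instance
def pvWitness_bp2 : Int × Int := (3, 2)

def Spec_bp2 (n : Int) (k : Int) (out : Int) : Prop := out = bp2_alt n k
instance (n : Int) (k : Int) (out : Int) : Decidable (Spec_bp2 n k out) := by unfold Spec_bp2; infer_instance

-- ===== CLAIM (what is proved, stated in full; the proofs are below) =====
def Claim_equal_bp2 : Prop := ∀ (n : Int) (k : Int), Dom_bp2 n k → Pre_bp2 n k → Spec_bp2 n k (bp2 n k)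

-- ===== LEMMAS AND PROOFS =====

-- proof-side abstractions
def pstep (s : List Int) (p : Int × Int) : List Int :=
  if PySem.List.pyGetD s p.1 0 = 1 ∨ PySem.List.pyGetD s p.2 0 = 1 then
    PySem.List.pySetD (PySem.List.pySetD s p.1 1) p.2 1
  else s

def pairT (n k t : Int) : Int × Int := (PySem.Int.mod t k, PySem.Int.mod (n - 1 - t) k)

def runFrom (n k total l : Int) (s : List Int) : List Int :=
  (PySem.List.pyRange l total 1).foldl (fun acc t => pstep acc (pairT n k t)) s


-- generic: a fold whose every step fixes s returns s
theorem pv_foldl_fix {α β : Type} (g : α → β → α) :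
    ∀ (xs : List β) (s : α), (∀ x ∈ xs, g s x = s) → xs.foldl g s = s
  | [], _, _ => rfl
  | x :: xs, s, h => by
    rw [List.foldl_cons, h x (by simp)]
    exact pv_foldl_fix g xs s (fun y hy => h y (by simp [hy]))

-- writing 1 where a 1 already stands does not change the list
theorem pv_setid (s : List Int) (i : Int) (h0 : 0 ≤ i)
    (h1 : PySem.List.pyGetD s i 0 = 1) : PySem.List.pySetD s i 1 = s := by
  by_cases hl : i < (s.length : Int)
  · rw [PySem.List.pySetD_of_nonneg s 1 h0]
    have hg := PySem.List.pyGetD_eq_getElem s 0 h0 hl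
    rw [hg] at h1
    rw [← h1]; simp
  · exfalso
    have hn : PySem.List.pyGet? s i = none := by
      rw [PySem.List.pyGet?_eq_none_iff]
      intro hr
      simp [PySem.Raise.InRange] at hr
      omega
    have h0' := PySem.List.pyGetD_of_none s i 0 hn
    rw [h0'] at h1
    exact absurd h1 (by norm_num)

theorem pv_foldl_stepB_fst :
    ∀ (ps : List (Int × Int)) (s : List Int) (b : Bool),
      (ps.foldl bp2StepB (s, b)).1 = ps.foldl pstep s
  | [], _, _ => rfl
  | p :: ps, s, b => by
    rw [List.foldl_cons, List.foldl_cons]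
    have h : bp2StepB (s, b) p = (pstep s p, (bp2StepB (s, b) p).2) := by
      simp only [bp2StepB, pstep]
      split_ifs <;> rfl
    rw [h]
    exact pv_foldl_stepB_fst ps _ _

theorem pv_flag_stays :
    ∀ (ps : List (Int × Int)) (s : List Int),
      (ps.foldl bp2StepB (s, true)).2 = true
  | [], _ => rfl
  | p :: ps, s => by
    rw [List.foldl_cons]
    have h : bp2StepB (s, true) p = ((bp2StepB (s, true) p).1, true) := by
      simp only [bp2StepB]
      split_ifs <;> rfl
    rw [h]
    exact pv_flag_stays ps _

-- if the changed flag never fired, every pair of the chunk already fixes s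
theorem pv_flag_false :
    ∀ (ps : List (Int × Int)) (s : List Int) (b : Bool),
      (∀ p ∈ ps, 0 ≤ p.1 ∧ 0 ≤ p.2) →
      (ps.foldl bp2StepB (s, b)).2 = false →
      ∀ p ∈ ps, pstep s p = s
  | [], _, _, _, _ => by intro p hp; cases hp
  | q :: ps, s, b, hnn, hf => by
    rw [List.foldl_cons] at hf
    by_cases hc : PySem.List.pyGetD s q.1 0 = 1 ∨ PySem.List.pyGetD s q.2 0 = 1
    · by_cases hcc : ¬ PySem.List.pyGetD s q.1 0 = 1 ∨ ¬ PySem.List.pyGetD s q.2 0 = 1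
      · exfalso
        have h : bp2StepB (s, b) q
            = (PySem.List.pySetD (PySem.List.pySetD s q.1 1) q.2 1, true) := by
          simp only [bp2StepB]
          rw [if_pos hc, if_pos hcc]
        rw [h, pv_flag_stays] at hf
        exact absurd hf (by simp)
      · push_neg at hcc
        obtain ⟨h1, h2⟩ := hcc
        have hq0 := hnn q (by simp)
        have hs2 : PySem.List.pySetD (PySem.List.pySetD s q.1 1) q.2 1 = s := by
          rw [pv_setid s q.1 hq0.1 h1]
          exact pv_setid s q.2 hq0.2 h2
        have hncc : ¬ (¬ PySem.List.pyGetD s q.1 0 = 1 ∨ ¬ PySem.List.pyGetD s q.2 0 = 1) := by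
          push_neg; exact ⟨h1, h2⟩
        have h : bp2StepB (s, b) q = (s, b) := by
          simp only [bp2StepB]
          rw [if_pos hc, if_neg hncc, hs2]
        rw [h] at hf
        intro p hp
        rcases List.mem_cons.mp hp with rfl | hp'
        · simp only [pstep]
          rw [if_pos hc]
          exact hs2
        · exact pv_flag_false ps s b (fun r hr => hnn r (by simp [hr])) hf p hp'
    · have h : bp2StepB (s, b) q = (s, b) := by
        simp only [bp2StepB]
        rw [if_neg hc]
      rw [h] at hf
      intro p hp
      rcases List.mem_cons.mp hp with rfl | hp'
      · simp only [pstep]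
        rw [if_neg hc]
      · exact pv_flag_false ps s b (fun r hr => hnn r (by simp [hr])) hf p hp'

-- the pair sequence is periodic: shifting t by a multiple of k gives the same pair
theorem pv_pair_shift (n k d t : Int) (hk : 0 < k) (hd : k ∣ d) :
    pairT n k (d + t) = pairT n k t := by
  obtain ⟨c, rfl⟩ := hd
  unfold pairT
  rw [PySem.Int.mod_eq_emod_of_pos hk, PySem.Int.mod_eq_emod_of_pos hk,
      PySem.Int.mod_eq_emod_of_pos hk, PySem.Int.mod_eq_emod_of_pos hk]
  simp only [Prod.mk.injEq]
  constructor
  · rw [show k * c + t = t + k * c by ring, Int.add_mul_emod_self_left]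
  · rw [show n - 1 - (k * c + t) = (n - 1 - t) + k * (-c) by ring, Int.add_mul_emod_self_left]

theorem pv_pair_mod (n k t : Int) (hk : 0 < k) :
    pairT n k t = pairT n k (PySem.Int.mod t k) := by
  have hdec : t = k * (t / k) + PySem.Int.mod t k := by
    rw [PySem.Int.mod_eq_emod_of_pos hk]
    exact (Int.ediv_add_emod t k).symm
  conv_lhs => rw [hdec]
  exact pv_pair_shift n k _ _ hk ⟨t / k, rfl⟩

-- A's while loop is the fold of pstep over the pair indices l, l+1, …, n/2 - 1
theorem pv_loopA (n k : Int) (_hn : 1 ≤ n) (_hk : 0 < k) :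
    ∀ (m : Nat) (l : Int) (s : List Int), 0 ≤ l → (n / 2 - l).toNat = m →
      bp2LoopA ((PySem.List.pyRange 0 n 1).map (fun i => PySem.Int.mod i k)) s l (n - 1 - l)
        = runFrom n k (n / 2) l s := by
  intro m
  induction m with
  | zero =>
    intro l s hl hm
    have hlr : ¬ l < n - 1 - l := by omega
    rw [bp2LoopA, dif_neg hlr]
    unfold runFrom
    rw [PySem.List.pyRange_one_eq_nil (by omega : n / 2 ≤ l)]
    rfl
  | succ m ih =>
    intro l s hl hm
    have hlt : l < n / 2 := by omega
    have hlr : l < n - 1 - l := by omega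
    have hal : PySem.List.pyGetD ((PySem.List.pyRange 0 n 1).map (fun i => PySem.Int.mod i k)) l 0
        = PySem.Int.mod l k :=
      PySem.List.pyGetD_map_pyRange_of_nonneg _ n l 0 hl (by omega)
    have har : PySem.List.pyGetD ((PySem.List.pyRange 0 n 1).map (fun i => PySem.Int.mod i k)) (n - 1 - l) 0
        = PySem.Int.mod (n - 1 - l) k :=
      PySem.List.pyGetD_map_pyRange_of_nonneg _ n (n - 1 - l) 0 (by omega) (by omega)
    rw [bp2LoopA, dif_pos hlr]
    simp only [hal, har]
    rw [show n - 1 - l - 1 = n - 1 - (l + 1) by ring]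
    rw [ih (l + 1) _ (by omega) (by omega)]
    unfold runFrom
    rw [PySem.List.pyRange_one_cons hlt, List.foldl_cons]
    rfl

-- B's chunked while loop with the skip equals the same fold from position done
theorem pv_loopB (n k : Int) (hk : 0 < k) :
    ∀ (fuel : Nat) (done : Int) (s : List Int), 0 ≤ done → k ∣ done →
      (n / 2 - done).toNat ≤ fuel →
      bp2LoopB ((PySem.List.pyRange 0 k 1).map
          (fun t => (PySem.Int.mod t k, PySem.Int.mod (n - 1 - t) k))) k (n / 2) fuel done s
        = runFrom n k (n / 2) done s := by
  intro fuel
  induction fuel with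
  | zero =>
    intro done s _ _ hfuel
    unfold runFrom
    rw [PySem.List.pyRange_one_eq_nil (by omega : n / 2 ≤ done)]
    rfl
  | succ fuel ih =>
    intro done s hd0 hdvd hfuel
    by_cases hd : done < n / 2
    · simp only [bp2LoopB, if_pos hd]
      have hch1 : 1 ≤ min k (n / 2 - done) := by omega
      have hchk : min k (n / 2 - done) ≤ k := min_le_left _ _
      have hchd : min k (n / 2 - done) ≤ n / 2 - done := min_le_right _ _
      have htake : (((PySem.List.pyRange 0 k 1).map
            (fun t => (PySem.Int.mod t k, PySem.Int.mod (n - 1 - t) k))).take (min k (n / 2 - done)).toNat)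
          = (PySem.List.pyRange 0 (min k (n / 2 - done)) 1).map
            (fun t => (PySem.Int.mod t k, PySem.Int.mod (n - 1 - t) k)) := by
        rw [← List.map_take]
        congr 1
        rw [PySem.List.pyRange_one_append 0 (min k (n / 2 - done)) k (by omega) (by omega)]
        exact List.take_left' (by rw [PySem.List.length_pyRange_one]; omega)
      have hfold : ∀ (s0 : List Int),
          ((PySem.List.pyRange 0 (min k (n / 2 - done)) 1).map
            (fun t => (PySem.Int.mod t k, PySem.Int.mod (n - 1 - t) k))).foldl pstep s0
          = (PySem.List.pyRange done (done + min k (n / 2 - done)) 1).foldl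
              (fun acc t => pstep acc (pairT n k t)) s0 := by
        intro s0
        rw [List.foldl_map]
        rw [PySem.List.pyRange_one done (done + min k (n / 2 - done)),
            PySem.List.pyRange_one 0 (min k (n / 2 - done))]
        rw [List.foldl_map, List.foldl_map]
        rw [show (done + min k (n / 2 - done) - done).toNat = (min k (n / 2 - done) - 0).toNat by omega]
        congr 1
        funext acc j
        rw [pv_pair_shift n k done (j : Int) hk hdvd]
        simp [pairT]
      have hr1 : ((((PySem.List.pyRange 0 k 1).map
            (fun t => (PySem.Int.mod t k, PySem.Int.mod (n - 1 - t) k))).take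
              (min k (n / 2 - done)).toNat).foldl bp2StepB (s, false)).1
          = (PySem.List.pyRange done (done + min k (n / 2 - done)) 1).foldl
              (fun acc t => pstep acc (pairT n k t)) s := by
        rw [pv_foldl_stepB_fst, htake, hfold]
      have hsplit : runFrom n k (n / 2) done s
          = (PySem.List.pyRange (done + min k (n / 2 - done)) (n / 2) 1).foldl
              (fun acc t => pstep acc (pairT n k t))
              ((PySem.List.pyRange done (done + min k (n / 2 - done)) 1).foldl
                (fun acc t => pstep acc (pairT n k t)) s) := by
        unfold runFrom
        rw [PySem.List.pyRange_one_append done (done + min k (n / 2 - done)) (n / 2)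
              (by omega) (by omega), List.foldl_append]
      by_cases hck : min k (n / 2 - done) < k
      · rw [if_pos (Or.inl hck)]
        have hce : done + min k (n / 2 - done) = n / 2 := by omega
        rw [hr1, hsplit, hce, PySem.List.pyRange_one_eq_nil (le_refl _), List.foldl_nil]
      · by_cases hflag : ((((PySem.List.pyRange 0 k 1).map
              (fun t => (PySem.Int.mod t k, PySem.Int.mod (n - 1 - t) k))).take
                (min k (n / 2 - done)).toNat).foldl bp2StepB (s, false)).2 = false
        · rw [if_pos (Or.inr hflag)]
          have hchk' : min k (n / 2 - done) = k := by omega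
          have hfix : ∀ p ∈ ((PySem.List.pyRange 0 k 1).map
              (fun t => (PySem.Int.mod t k, PySem.Int.mod (n - 1 - t) k))), pstep s p = s := by
            have hzero : (((PySem.List.pyRange 0 k 1).map
                (fun t => (PySem.Int.mod t k, PySem.Int.mod (n - 1 - t) k))).take
                  (min k (n / 2 - done)).toNat)
                = ((PySem.List.pyRange 0 k 1).map
                  (fun t => (PySem.Int.mod t k, PySem.Int.mod (n - 1 - t) k))) := by
              apply List.take_of_length_le
              rw [List.length_map, PySem.List.length_pyRange_one]
              omega
            have h1 := pv_flag_false _ s false (by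
              intro p hp
              obtain ⟨t, _, rfl⟩ := List.mem_map.mp (by rw [← hzero]; exact hp)
              exact ⟨PySem.Int.mod_nonneg t hk, PySem.Int.mod_nonneg (n - 1 - t) hk⟩) hflag
            rw [hzero] at h1
            exact h1
          have hfixT : ∀ t : Int, pstep s (pairT n k t) = s := by
            intro t
            rw [pv_pair_mod n k t hk]
            apply hfix
            refine List.mem_map.mpr ⟨PySem.Int.mod t k, ?_, rfl⟩
            exact PySem.List.mem_pyRange_one.mpr
              ⟨PySem.Int.mod_nonneg t hk, PySem.Int.mod_lt t hk⟩
          have hs1 : (PySem.List.pyRange done (done + min k (n / 2 - done)) 1).foldl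
              (fun acc t => pstep acc (pairT n k t)) s = s :=
            pv_foldl_fix _ _ s (fun t _ => hfixT t)
          have hs2 : (PySem.List.pyRange (done + min k (n / 2 - done)) (n / 2) 1).foldl
              (fun acc t => pstep acc (pairT n k t)) s = s :=
            pv_foldl_fix _ _ s (fun t _ => hfixT t)
          rw [hr1, hsplit, hs1, hs2]
        · have hno : ¬ (min k (n / 2 - done) < k ∨ ((((PySem.List.pyRange 0 k 1).map
              (fun t => (PySem.Int.mod t k, PySem.Int.mod (n - 1 - t) k))).take
                (min k (n / 2 - done)).toNat).foldl bp2StepB (s, false)).2 = false) := by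
            rintro (h | h)
            · exact hck h
            · exact hflag h
          rw [if_neg hno]
          have hchk' : min k (n / 2 - done) = k := by omega
          rw [hr1]
          rw [ih (done + min k (n / 2 - done)) _ (by omega)
                (by rw [hchk']; exact hdvd.add (dvd_refl k)) (by omega)]
          rw [hsplit]
          rfl
    · simp only [bp2LoopB, if_neg hd]
      unfold runFrom
      rw [PySem.List.pyRange_one_eq_nil (by omega : n / 2 ≤ done)]
      rfl

-- ===== VERDICT (by name: the statement is the Claim_ definition above) =====
theorem bp2_spec : Claim_equal_bp2 := by
  intro n k _ hpre
  obtain ⟨hn, hk⟩ := hpre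
  unfold Spec_bp2
  by_cases hc : k > n ∨ PySem.Int.mod n k = 0
  · unfold bp2 bp2_alt
    rw [if_pos hc, if_pos hc]
  · have hk0 : (0 : Int) < k := by omega
    simp only [bp2, bp2_alt, if_neg hc]
    have hinit : ((PySem.List.pyRange 0 k 1).map (fun _ => (0 : Int)))
        = List.replicate k.toNat (0 : Int) := by
      rw [List.map_const', PySem.List.length_pyRange_one]
      congr 1
      omega
    rw [hinit, PySem.Int.floordiv_eq_ediv_of_pos (by norm_num : (0 : Int) < 2)]
    have hA := pv_loopA n k hn hk0 (n / 2 - 0).toNat 0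
      (PySem.List.pySetD (List.replicate k.toNat (0 : Int)) 0 1) (le_refl 0) rfl
    rw [show n - 1 - 0 = n - 1 by ring] at hA
    have hB := pv_loopB n k hk0 ((n / 2).toNat + 1) 0
      (PySem.List.pySetD (List.replicate k.toNat (0 : Int)) 0 1) (le_refl 0)
      (dvd_zero k) (by omega)
    rw [hA, hB]
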